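-- pv_equiv track=rewrite | github.com/ktawiah/CodePath-DSA | test.py | getminNumberOfSwaps
-- ===== SOURCE A (Python) =====
-- def getminNumberOfSwaps(arr):
--     """
--     Problem: Given an array of binary digits, rearrange the array such that all the zeros
--     are grouped at one end and all the ones are grouped at the opposite end. Calculate
--     the minimum number of swaps needed to sort the array in this manner.
--
--     Approach-1:
--     1. A brute-force approach would try every possible configuration and count the swaps.
--     2. This is inefficient and would not work well for larger arrays, since the time complexity
--        would be high.
--
--     Approach-2 (Optimal Solution):
--     1. Count the total number of 1s in the array. Let's call this count "total_ones".
--     2. Use a sliding window of size "total_ones" and count how many 1s are in each window.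
--     3. The minimum number of swaps needed is the window with the fewest 1s, which corresponds to
--        the fewest out-of-place 1s.
--     4. This will give the number of swaps required to move all 1s together and all 0s together.
--
--     Time Complexity: O(n), since we just go over the array once to count the 1s and then slide the window.
--     Space Complexity: O(1), we only need a few extra variables.
--
--     Solve -> Done
--     Step -> Done
--     """
--     min_zero_swaps, min_one_swaps = 0, 0
--     one_count, zero_count = 0, 0
--
--     for num in arr:
--         if num == 0:
--             zero_count += 1
--             min_zero_swaps += one_count
--         else:
--             one_count += 1
--             min_one_swaps += zero_count
--
--     return min(min_one_swaps, min_zero_swaps)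
-- ===== SOURCE B (Python) =====
-- def getminNumberOfSwaps(arr):
--     zpos = [i for i, x in enumerate(arr) if x == 0]
--     opos = [i for i, x in enumerate(arr) if x != 0]
--     m, k = len(zpos), len(opos)
--     min_one_swaps = sum(opos) - k * (k - 1) // 2
--     min_zero_swaps = sum(zpos) - m * (m - 1) // 2
--     return min(min_one_swaps, min_zero_swaps)
-- ===== Notes on version B (the rewrite author's own statement) =====
-- stated objective: alternative
-- what changed: Replaces A's running inversion-count accumulation (four mutable counters updated per element) with a closed-form formula: partition the indices by x == 0 and compute each swap count as sum-of-positions minus a triangular number.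
import Mathlib
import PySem

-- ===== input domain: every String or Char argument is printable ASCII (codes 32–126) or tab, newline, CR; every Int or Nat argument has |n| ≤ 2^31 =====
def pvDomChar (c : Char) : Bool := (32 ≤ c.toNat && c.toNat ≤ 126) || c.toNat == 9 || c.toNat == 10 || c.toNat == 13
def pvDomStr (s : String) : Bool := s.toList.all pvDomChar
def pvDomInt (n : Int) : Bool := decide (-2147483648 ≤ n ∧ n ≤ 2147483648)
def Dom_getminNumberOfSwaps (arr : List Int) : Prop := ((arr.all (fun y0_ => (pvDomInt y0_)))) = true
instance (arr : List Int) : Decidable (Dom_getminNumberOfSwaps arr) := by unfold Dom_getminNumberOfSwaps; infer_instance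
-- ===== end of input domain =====

-- B replaces A's running inversion-count accumulation with a closed-form
-- position-sum-minus-triangular-number formula (alternative decomposition, same O(n) cost).


-- ===== PORT A =====
-- fold state = (min_zero_swaps, min_one_swaps, one_count, zero_count)
def getminNumberOfSwaps (arr : List Int) : Int :=
  let s := arr.foldl
    (fun (st : Int × Int × Int × Int) num =>
      if num == 0 then (st.1 + st.2.2.1, st.2.1, st.2.2.1, st.2.2.2 + 1)
      else (st.1, st.2.1 + st.2.2.2, st.2.2.1 + 1, st.2.2.2))
    (0, 0, 0, 0)
  min s.2.1 s.1

-- ===== PORT B =====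
def getminNumberOfSwaps_alt (arr : List Int) : Int :=
  let zpos := ((PySem.List.enumerate arr).filter (fun p => p.2 == 0)).map (·.1)
  let opos := ((PySem.List.enumerate arr).filter (fun p => !(p.2 == 0))).map (·.1)
  let m : Int := zpos.length
  let k : Int := opos.length
  let min_one_swaps := opos.sum - PySem.Int.floordiv (k * (k - 1)) 2
  let min_zero_swaps := zpos.sum - PySem.Int.floordiv (m * (m - 1)) 2
  min min_one_swaps min_zero_swaps

-- ===== PRECONDITION & SPEC =====
def Spec_getminNumberOfSwaps (arr : List Int) (out : Int) : Prop := out = getminNumberOfSwaps_alt arr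
instance (arr : List Int) (out : Int) : Decidable (Spec_getminNumberOfSwaps arr out) := by unfold Spec_getminNumberOfSwaps; infer_instance

-- ===== CLAIM (what is proved, stated in full; the proofs are below) =====
def Claim_equal_getminNumberOfSwaps : Prop := ∀ (arr : List Int), Dom_getminNumberOfSwaps arr → Spec_getminNumberOfSwaps arr (getminNumberOfSwaps arr)

-- ===== LEMMAS AND PROOFS =====

-- proof-only abbreviations for B's two position lists
def pvZ (xs : List Int) : List Int :=
  ((PySem.List.enumerate xs).filter (fun p => p.2 == 0)).map (·.1)
def pvO (xs : List Int) : List Int :=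
  ((PySem.List.enumerate xs).filter (fun p => !(p.2 == 0))).map (·.1)

theorem pv_split (xs : List Int) :
    (pvZ xs).length + (pvO xs).length = xs.length := by
  unfold pvZ pvO
  simp only [List.length_map]
  have h := (List.length_eq_length_filter_add (l := PySem.List.enumerate xs 0)
    (fun p => p.2 == 0)).symm
  simpa [PySem.List.length_enumerate] using h

-- triangular-number step: floordiv ((n+1)*n) 2 = floordiv (n*(n-1)) 2 + n
theorem pv_tri_succ (n : Int) :
    PySem.Int.floordiv ((n + 1) * n) 2 = PySem.Int.floordiv (n * (n - 1)) 2 + n := by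
  have h1 : PySem.Int.floordiv ((n + 1) * n) 2 = ((n + 1) * n) / 2 :=
    PySem.Int.floordiv_eq_ediv_of_pos (by norm_num)
  have h2 : PySem.Int.floordiv (n * (n - 1)) 2 = (n * (n - 1)) / 2 :=
    PySem.Int.floordiv_eq_ediv_of_pos (by norm_num)
  have h3 : (n + 1) * n = n * (n - 1) + 2 * n := by ring
  rw [h1, h2, h3]; omega

theorem pv_enum_append (xs : List Int) (x : Int) :
    PySem.List.enumerate (xs ++ [x]) 0
      = PySem.List.enumerate xs 0 ++ [((xs.length : Int), x)] := by
  rw [PySem.List.enumerate_append]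
  simp [PySem.List.enumerate_cons, PySem.List.enumerate_nil]

theorem pvZ_append (xs : List Int) (x : Int) :
    pvZ (xs ++ [x]) = pvZ xs ++ (if x = 0 then [((xs.length : Int))] else []) := by
  unfold pvZ
  rw [pv_enum_append, List.filter_append, List.map_append]
  by_cases hx : x = 0 <;> simp [hx]

theorem pvO_append (xs : List Int) (x : Int) :
    pvO (xs ++ [x]) = pvO xs ++ (if x = 0 then [] else [((xs.length : Int))]) := by
  unfold pvO
  rw [pv_enum_append, List.filter_append, List.map_append]
  by_cases hx : x = 0 <;> simp [hx]

-- the loop invariant: A's fold state on arr equals B's closed-form quantities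
theorem pv_loop_eq (arr : List Int) :
    arr.foldl
      (fun (st : Int × Int × Int × Int) num =>
        if num == 0 then (st.1 + st.2.2.1, st.2.1, st.2.2.1, st.2.2.2 + 1)
        else (st.1, st.2.1 + st.2.2.2, st.2.2.1 + 1, st.2.2.2))
      (0, 0, 0, 0)
    = ((pvZ arr).sum - PySem.Int.floordiv (((pvZ arr).length : Int) * (((pvZ arr).length : Int) - 1)) 2,
       (pvO arr).sum - PySem.Int.floordiv (((pvO arr).length : Int) * (((pvO arr).length : Int) - 1)) 2,
       ((pvO arr).length : Int), ((pvZ arr).length : Int)) := by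
  induction arr using List.reverseRecOn with
  | nil => simp [pvZ, pvO, PySem.List.enumerate]
  | append_singleton xs x ih =>
      rw [List.foldl_append, ih, pvZ_append, pvO_append]
      have hsplit := pv_split xs
      by_cases hx : x = 0
      · subst hx
        simp only [if_pos, List.foldl_cons, List.foldl_nil, beq_self_eq_true, if_true,
          List.append_nil, List.sum_append, List.length_append, List.sum_cons, List.sum_nil,
          List.length_cons, List.length_nil, Prod.mk.injEq]
        have h2 : ((pvZ xs).length : Int) + ((pvO xs).length : Int) = (xs.length : Int) := by
          exact_mod_cast hsplit
        refine ⟨?_, trivial, trivial, by push_cast; ring⟩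
        push_cast
        rw [add_sub_cancel_right, pv_tri_succ]
        linarith
      · have hbx : (x == 0) = false := by simpa using hx
        simp only [if_neg hx, List.foldl_cons, List.foldl_nil, hbx, Bool.false_eq_true,
          if_false, List.append_nil, List.sum_append, List.length_append, List.sum_cons,
          List.sum_nil, List.length_cons, List.length_nil, Prod.mk.injEq]
        have h2 : ((pvZ xs).length : Int) + ((pvO xs).length : Int) = (xs.length : Int) := by
          exact_mod_cast hsplit
        refine ⟨trivial, ?_, by push_cast; ring, trivial⟩
        push_cast
        rw [add_sub_cancel_right, pv_tri_succ]
        linarith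

-- ===== VERDICT (by name: the statement is the Claim_ definition above) =====
theorem getminNumberOfSwaps_spec : Claim_equal_getminNumberOfSwaps := by
  intro arr _
  unfold Spec_getminNumberOfSwaps getminNumberOfSwaps getminNumberOfSwaps_alt
  rw [pv_loop_eq]
  simp only [pvZ, pvO]
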